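-- pv_equiv track=rewrite | github.com/tlynch1315/interview-questions | googleTechDevGuide/substring/test_substring.py | getLettersAfter
-- ===== SOURCE A (Python) =====
-- def getLettersAfter(string):
--     result = {}
--     for i, char in enumerate(string):
--         if char in result:
--             continue
--         else:
--             result[char] = [x for x in string[i:]]
--     return result
-- ===== SOURCE B (Python) =====
-- def getLettersAfter(string):
--     # Right-to-left pass with a running suffix accumulator: each step prepends the
--     # current char to the suffix, and prepends (char, suffix) to an association
--     # list (dropping any later-occurrence entry for that char), so the list ends
--     # up in first-occurrence order with first-occurrence suffixes; no slicing.
--     suffix = []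
--     items = []
--     for c in reversed(string):
--         suffix = [c] + suffix
--         items = [(c, suffix)] + [p for p in items if p[0] != c]
--     return dict(items)
-- ===== Notes on version B (the rewrite author's own statement) =====
-- stated objective: alternative
-- what changed: A scans forward, testing dict membership and slicing the string at each new character; B makes one right-to-left pass maintaining a running suffix accumulator and an association list built back-to-front (prepend the new pair, filter out any later-occurrence entry), with no slicing or membership test, then wraps the list in a dict.
import Mathlib
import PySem

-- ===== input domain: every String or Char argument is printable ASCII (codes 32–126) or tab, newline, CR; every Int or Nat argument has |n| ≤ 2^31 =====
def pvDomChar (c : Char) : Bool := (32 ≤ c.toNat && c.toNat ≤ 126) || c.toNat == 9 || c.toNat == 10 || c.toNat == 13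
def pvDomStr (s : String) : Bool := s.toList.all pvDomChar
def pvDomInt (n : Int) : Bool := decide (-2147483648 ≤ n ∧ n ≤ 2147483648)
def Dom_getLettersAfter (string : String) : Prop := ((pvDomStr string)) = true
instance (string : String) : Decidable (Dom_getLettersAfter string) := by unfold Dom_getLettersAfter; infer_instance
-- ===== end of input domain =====

-- B replaces A's forward scan (membership test + a fresh slice per new character)
-- by a single right-to-left pass with a running suffix accumulator, building the
-- association list back-to-front (prepend, filter out later-occurrence entries).

-- a Python 1-character string (a char of the iterated string / a dict key)
def pvToS (c : Char) : String := String.ofList [c]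

-- ===== PORT A =====
def getLettersAfter (string : String) : List (String × List String) :=
  let result : PySem.Dict String (List String) :=
    (PySem.List.enumerate string.toList).foldl
      (fun result p =>
        if result.contains (pvToS p.2) then result
        else result.insert (pvToS p.2)
          ((PySem.List.slice string.toList (some p.1) none).map pvToS))
      PySem.Dict.empty
  result.items

-- ===== PORT B =====
def getLettersAfter_alt (string : String) : List (String × List String) :=
  -- suffix = []; items = []
  -- for c in reversed(string): suffix = [c]+suffix; items = [(c,suffix)] + [p for p in items if p[0] != c]
  let st : List String × List (String × List String) :=
    string.toList.reverse.foldl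
      (fun st c =>
        let suffix := pvToS c :: st.1
        (suffix, (pvToS c, suffix) :: st.2.filter (fun p => p.1 != pvToS c)))
      ([], [])
  -- return dict(items)
  (st.2.foldl (fun d p => d.insert p.1 p.2) PySem.Dict.empty).items

-- ===== PRECONDITION & SPEC =====
def Spec_getLettersAfter (string : String) (out : List (String × List String)) : Prop := out = getLettersAfter_alt string
instance (string : String) (out : List (String × List String)) : Decidable (Spec_getLettersAfter string out) := by unfold Spec_getLettersAfter; infer_instance

-- ===== CLAIM (what is proved, stated in full; the proofs are below) =====
def Claim_equal_getLettersAfter : Prop := ∀ (string : String), Dom_getLettersAfter string → Spec_getLettersAfter string (getLettersAfter string)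

-- ===== LEMMAS AND PROOFS =====

-- A's loop as structural recursion on the remaining characters
def aGo : List Char → PySem.Dict String (List String) → PySem.Dict String (List String)
  | [], d => d
  | c :: rest, d =>
      if d.contains (pvToS c) then aGo rest d
      else aGo rest (d.insert (pvToS c) ((c :: rest).map pvToS))

-- the common closed form: first-occurrence association list of a character list
def F : List Char → List (String × List String)
  | [] => []
  | c :: rest => (pvToS c, (c :: rest).map pvToS) :: (F rest).filter (fun p => p.1 != pvToS c)

-- A's enumerate/slice fold is aGo
theorem bridgeA (l₀ : List Char) :
    ∀ (l : List Char) (k : ℕ) (d : PySem.Dict String (List String)),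
      l₀.drop k = l →
      (PySem.List.enumerate l (k : Int)).foldl
        (fun result p =>
          if result.contains (pvToS p.2) then result
          else result.insert (pvToS p.2)
            ((PySem.List.slice l₀ (some p.1) none).map pvToS))
        d = aGo l d := by
  intro l
  induction l with
  | nil => intro k d _; simp [PySem.List.enumerate_nil, aGo]
  | cons c rest ih =>
    intro k d hdrop
    rw [PySem.List.enumerate_cons, List.foldl_cons]
    have hslice : PySem.List.slice l₀ (some (k : Int)) none = c :: rest := by
      rw [PySem.List.slice_from_natCast, hdrop]
    have hdrop' : l₀.drop (k + 1) = rest := by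
      rw [← List.drop_drop, hdrop]; rfl
    have hcast : (k : Int) + 1 = ((k + 1 : ℕ) : Int) := by push_cast; ring
    rw [aGo]
    by_cases hc : d.contains (pvToS c) = true
    · simp only [hslice, hc, if_true, hcast]
      exact ih (k + 1) d hdrop'
    · simp only [hslice, hc, Bool.false_eq_true, if_false, hcast]
      exact ih (k + 1) _ hdrop'

-- aGo appends exactly the fresh part of F
theorem aGo_items : ∀ (l : List Char) (d : PySem.Dict String (List String)),
    (aGo l d).items = d.items ++ (F l).filter (fun p => !(d.contains p.1)) := by
  intro l
  induction l with
  | nil => intro d; simp [aGo, F]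
  | cons c rest ih =>
    intro d
    by_cases hc : d.contains (pvToS c) = true
    · rw [aGo, if_pos hc, ih d, F]
      congr 1
      rw [List.filter_cons]
      simp only [hc, Bool.not_true, Bool.false_eq_true, if_false, List.filter_filter]
      apply List.filter_congr
      intro p _
      cases hd : d.contains p.1 with
      | true => simp []
      | false =>
        have hne : (p.1 != pvToS c) = true := by
          simp only [bne_iff_ne, ne_eq]
          intro h
          rw [h] at hd
          exact absurd hc (by simp [hd])
        simp [hne]
    · have hcf : d.contains (pvToS c) = false := by simpa using hc
      rw [aGo, if_neg (by simp [hcf]), ih, F]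
      rw [PySem.Dict.items_insert_of_not_contains _ _ hcf]
      rw [List.filter_cons]
      simp only [hcf, Bool.not_false, if_true, List.filter_filter, List.append_assoc,
        List.cons_append, List.nil_append]
      congr 2
      apply List.filter_congr
      intro p _
      rw [PySem.Dict.contains_insert]
      by_cases hp : p.1 = pvToS c
      · simp [hp, hcf]
      · have hb : (p.1 == pvToS c) = false := by simpa using hp
        have hne : (p.1 != pvToS c) = true := by simpa using hp
        simp [hb, hne]

-- B's right-to-left fold computes (the mapped list, F)
theorem bridgeB : ∀ (l : List Char),
    l.reverse.foldl
      (fun st c =>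
        let suffix := pvToS c :: st.1
        (suffix, (pvToS c, suffix) :: st.2.filter (fun p => p.1 != pvToS c)))
      (([] : List String), ([] : List (String × List String)))
      = (l.map pvToS, F l) := by
  intro l
  induction l with
  | nil => simp [F]
  | cons c rest ih =>
    rw [List.reverse_cons, List.foldl_append, ih]
    simp [F]

-- the keys of F are distinct
theorem F_keys_nodup : ∀ (l : List Char), ((F l).map Prod.fst).Nodup := by
  intro l
  induction l with
  | nil => simp [F]
  | cons c rest ih =>
    rw [F, List.map_cons, List.nodup_cons]
    constructor
    · intro hmem
      obtain ⟨p, hp, hp1⟩ := List.mem_map.mp hmem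
      have := List.of_mem_filter hp
      rw [hp1] at this
      simp at this
    · exact ih.sublist (List.Sublist.map _ List.filter_sublist)

-- ===== VERDICT (by name: the statement is the Claim_ definition above) =====
theorem getLettersAfter_spec : Claim_equal_getLettersAfter := by
  intro string _
  show getLettersAfter string = getLettersAfter_alt string
  set cs := string.toList with hcs
  have ha : getLettersAfter string = (aGo cs PySem.Dict.empty).items := by
    have h0 := bridgeA cs cs 0 PySem.Dict.empty (by simp)
    rw [Nat.cast_zero] at h0
    simpa [getLettersAfter] using congrArg PySem.Dict.items h0
  have hA : getLettersAfter string = F cs := by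
    rw [ha, aGo_items,
      show (PySem.Dict.empty : PySem.Dict String (List String)).items = [] from rfl,
      List.nil_append]
    simp [PySem.Dict.contains_empty]
  have hB : getLettersAfter_alt string = F cs := by
    simp only [getLettersAfter_alt, ← hcs]
    rw [bridgeB cs]
    have h := PySem.Dict.items_foldl_insert_fresh (F cs) Prod.fst Prod.snd PySem.Dict.empty
      (by intro a _; exact PySem.Dict.contains_empty _) (F_keys_nodup cs)
    simpa using h
  rw [hA, hB]
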